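-- pv_equiv track=rewrite | github.com/cuevarks/domino-pyproy | logical/tiles.py | check_tranc
-- ===== SOURCE A (Python) =====
-- def check_tranc(a,b):
--     u = 0
--     for f in b:
--         for i in range(0, len(f)):
--             if a[0][0] == f[i][0] or a[len(a) - 1][1] == f[i][0] or a[0][0] == f[i][1] or a[len(a) - 1][1] == f[i][1]:
--                 u += 1
--     if u > 0:
--         return False
--     else:
--         return True
-- ===== SOURCE B (Python) =====
-- def check_tranc(a, b):
--     # Sort-then-binary-search: flatten b's values, sort them once, then locate
--     # each of a's two endpoint values by binary search on the sorted list.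
--     vals = sorted(x for f in b for p in f for x in p)
--     if not vals:
--         return True
--     t0 = a[0][0]
--     t1 = a[len(a) - 1][1]
--
--     def found(t):
--         lo, hi = 0, len(vals)
--         while lo < hi:
--             mid = (lo + hi) // 2
--             if vals[mid] < t:
--                 lo = mid + 1
--             elif vals[mid] > t:
--                 hi = mid
--             else:
--                 return True
--         return False
--
--     return not found(t0) and not found(t1)
-- ===== Notes on version B (the rewrite author's own statement) =====
-- stated objective: alternative
-- what changed: Replaces A's nested scan that counts four-way equality hits per pair with a sort of all values occurring in b followed by two binary searches for a's endpoint values.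
-- outside the precondition, e.g. on check_tranc([], [[(1, 2)]]): A raises IndexError, B raises IndexError
import Mathlib
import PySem

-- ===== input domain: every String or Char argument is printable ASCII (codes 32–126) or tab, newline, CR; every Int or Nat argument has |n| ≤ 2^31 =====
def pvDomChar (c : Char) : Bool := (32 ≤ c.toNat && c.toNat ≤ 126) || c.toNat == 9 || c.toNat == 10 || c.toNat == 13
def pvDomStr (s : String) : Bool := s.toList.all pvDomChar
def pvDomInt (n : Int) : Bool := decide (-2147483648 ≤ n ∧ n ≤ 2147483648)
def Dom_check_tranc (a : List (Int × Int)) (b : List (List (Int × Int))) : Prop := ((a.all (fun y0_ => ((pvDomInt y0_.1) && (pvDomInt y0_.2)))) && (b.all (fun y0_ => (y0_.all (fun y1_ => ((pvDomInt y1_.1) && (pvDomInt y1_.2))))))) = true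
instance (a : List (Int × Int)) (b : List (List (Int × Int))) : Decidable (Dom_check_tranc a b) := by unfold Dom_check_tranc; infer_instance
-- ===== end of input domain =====

-- B is an alternative algorithm: sort all values occurring in b once, then find a's
-- two endpoint values by binary search (return-value equivalence only; no speed claim).

-- ===== PORT A =====
def check_tranc (a : List (Int × Int)) (b : List (List (Int × Int))) : Bool :=
  let u : Int := b.foldl (fun u f =>
      (PySem.List.pyRange 0 (PySem.List.len f) 1).foldl
        (fun u i =>
          if (PySem.List.pyGetD a 0 (0, 0)).1 == (PySem.List.pyGetD f i (0, 0)).1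
             || (PySem.List.pyGetD a (PySem.List.len a - 1) (0, 0)).2 == (PySem.List.pyGetD f i (0, 0)).1
             || (PySem.List.pyGetD a 0 (0, 0)).1 == (PySem.List.pyGetD f i (0, 0)).2
             || (PySem.List.pyGetD a (PySem.List.len a - 1) (0, 0)).2 == (PySem.List.pyGetD f i (0, 0)).2
          then u + 1 else u) u) 0
  if u > 0 then false else true

-- ===== PORT B =====
-- B's inner while-loop 'found(t)': binary search for t in vals over the range [lo, hi)
def pvFound (vals : List Int) (t : Int) (lo hi : Int) : Bool :=
  if h : lo < hi then
    if PySem.List.pyGetD vals (PySem.Int.floordiv (lo + hi) 2) 0 < t then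
      pvFound vals t (PySem.Int.floordiv (lo + hi) 2 + 1) hi
    else if PySem.List.pyGetD vals (PySem.Int.floordiv (lo + hi) 2) 0 > t then
      pvFound vals t lo (PySem.Int.floordiv (lo + hi) 2)
    else true
  else false
termination_by (hi - lo).toNat
decreasing_by
  · have := PySem.Int.floordiv_two_mid_bounds (le_of_lt h)
    omega
  · have h2 : PySem.Int.floordiv (lo + hi) 2 < hi := by
      rw [PySem.Int.floordiv_lt_iff_lt_mul (by norm_num : (0:Int) < 2)]; omega
    have := PySem.Int.floordiv_two_mid_bounds (le_of_lt h)
    omega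

def check_tranc_alt (a : List (Int × Int)) (b : List (List (Int × Int))) : Bool :=
  let vals : List Int :=
    PySem.List.sorted (b.flatMap (fun f => f.flatMap (fun p => [p.1, p.2]))) (fun x => x) false
  if vals.isEmpty then true
  else
    let t0 := (PySem.List.pyGetD a 0 (0, 0)).1
    let t1 := (PySem.List.pyGetD a (PySem.List.len a - 1) (0, 0)).2
    !(pvFound vals t0 0 (PySem.List.len vals)) && !(pvFound vals t1 0 (PySem.List.len vals))

-- ===== PRECONDITION & SPEC =====
-- Pre_ excludes exactly the inputs on which Python A raises IndexError (a empty while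
-- some tile of b is non-empty, so a[0] is evaluated); Python B raises there too.
def Pre_check_tranc (a : List (Int × Int)) (b : List (List (Int × Int))) : Prop :=
  a ≠ [] ∨ ∀ f ∈ b, f = []
instance (a : List (Int × Int)) (b : List (List (Int × Int))) : Decidable (Pre_check_tranc a b) := by unfold Pre_check_tranc; infer_instance
def pvWitness_check_tranc : (List (Int × Int)) × (List (List (Int × Int))) := ([(1, 2)], [[(3, 4)], []])

def Spec_check_tranc (a : List (Int × Int)) (b : List (List (Int × Int))) (out : Bool) : Prop := out = check_tranc_alt a b
instance (a : List (Int × Int)) (b : List (List (Int × Int))) (out : Bool) : Decidable (Spec_check_tranc a b out) := by unfold Spec_check_tranc; infer_instance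

-- ===== CLAIM (what is proved, stated in full; the proofs are below) =====
def Claim_equal_check_tranc : Prop := ∀ (a : List (Int × Int)) (b : List (List (Int × Int))), Dom_check_tranc a b → Pre_check_tranc a b → Spec_check_tranc a b (check_tranc a b)

-- ===== LEMMAS AND PROOFS =====

-- the per-pair hit test of A's inner loop, with a's two endpoint values abstracted out
def pvHit (t0 t1 : Int) (p : Int × Int) : Bool :=
  t0 == p.1 || t1 == p.1 || t0 == p.2 || t1 == p.2

-- A's counting fold adds the number of hitting pairs
theorem pvInner_count (t0 t1 : Int) (f : List (Int × Int)) (u : Int) :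
    f.foldl (fun u fi => if pvHit t0 t1 fi then u + 1 else u) u
      = u + (f.countP (pvHit t0 t1) : Int) := by
  induction f generalizing u with
  | nil => simp
  | cons p rest ih =>
    simp only [List.foldl_cons, List.countP_cons, ih]
    by_cases h : pvHit t0 t1 p = true <;> simp [h] <;> ring

-- the total count is positive iff some value of b hits an endpoint
theorem pvCount_pos (t0 t1 : Int) (b : List (List (Int × Int))) :
    (0 < (b.map (fun f => ((f.countP (pvHit t0 t1)) : Int))).sum)
      ↔ ∃ x ∈ b.flatMap (fun f => f.flatMap (fun p => [p.1, p.2])), x = t0 ∨ x = t1 := by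
  induction b with
  | nil => simp
  | cons f rest ih =>
    simp only [List.map_cons, List.sum_cons, List.flatMap_cons, List.mem_append]
    constructor
    · intro h
      by_cases hf : 0 < (f.countP (pvHit t0 t1) : Int)
      · rw [Int.natCast_pos, List.countP_pos_iff] at hf
        obtain ⟨p, hp, hhit⟩ := hf
        simp only [pvHit, Bool.or_eq_true, beq_iff_eq] at hhit
        have hmem : ∀ v, v = p.1 ∨ v = p.2 → v ∈ f.flatMap (fun q => [q.1, q.2]) := by
          intro v hv
          exact List.mem_flatMap.2 ⟨p, hp, by rcases hv with rfl | rfl <;> simp⟩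
        rcases hhit with ((h1 | h1) | h1) | h1
        · exact ⟨p.1, Or.inl (hmem p.1 (Or.inl rfl)), Or.inl h1.symm⟩
        · exact ⟨p.1, Or.inl (hmem p.1 (Or.inl rfl)), Or.inr h1.symm⟩
        · exact ⟨p.2, Or.inl (hmem p.2 (Or.inr rfl)), Or.inl h1.symm⟩
        · exact ⟨p.2, Or.inl (hmem p.2 (Or.inr rfl)), Or.inr h1.symm⟩
      · have : 0 < (rest.map (fun f => ((f.countP (pvHit t0 t1)) : Int))).sum := by
          omega
        obtain ⟨x, hx, hr⟩ := ih.1 this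
        exact ⟨x, Or.inr hx, hr⟩
    · rintro ⟨x, hx | hx, hor⟩
      · have hpos : 0 < (f.countP (pvHit t0 t1) : Int) := by
          rw [Int.natCast_pos, List.countP_pos_iff]
          obtain ⟨p, hp, hv⟩ := List.mem_flatMap.1 hx
          refine ⟨p, hp, ?_⟩
          simp only [List.mem_cons, List.not_mem_nil, or_false] at hv
          simp only [pvHit, Bool.or_eq_true, beq_iff_eq]
          rcases hv with rfl | rfl
          · rcases hor with rfl | rfl
            · exact Or.inl (Or.inl (Or.inl rfl))
            · exact Or.inl (Or.inl (Or.inr rfl))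
          · rcases hor with rfl | rfl
            · exact Or.inl (Or.inr rfl)
            · exact Or.inr rfl
        have hnn : 0 ≤ (rest.map (fun f => ((f.countP (pvHit t0 t1)) : Int))).sum := by
          apply List.sum_nonneg; intro y hy
          simp only [List.mem_map] at hy
          obtain ⟨g, _, rfl⟩ := hy
          exact Int.natCast_nonneg _
        omega
      · have := ih.2 ⟨x, hx, hor⟩
        have hnn : 0 ≤ (f.countP (pvHit t0 t1) : Int) := Int.natCast_nonneg _
        omega

-- binary search over [lo, hi) on a sorted list finds exactly the occurrences in the range
theorem pvFound_iff (vals : List Int) (t : Int) (hs : vals.Pairwise (· ≤ ·)) :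
    ∀ (lo hi : Int), 0 ≤ lo → hi ≤ (vals.length : Int) →
      (pvFound vals t lo hi = true ↔ ∃ i : Nat, lo ≤ (i : Int) ∧ (i : Int) < hi ∧ vals[i]? = some t) := by
  have hmono : ∀ (i j : Nat) (hij : i ≤ j) (hj : j < vals.length),
      vals[i]'(Nat.lt_of_le_of_lt hij hj) ≤ vals[j]'hj := by
    intro i j hij hj
    rcases Nat.lt_or_eq_of_le hij with h | h
    · exact List.pairwise_iff_getElem.1 hs i j (Nat.lt_of_le_of_lt hij hj) hj h
    · subst h; exact le_refl _
  intro lo hi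
  induction lo, hi using pvFound.induct vals t with
  | case1 lo hi h hlt ih =>
    intro hlo hhi
    rw [pvFound]
    have hmid := PySem.Int.floordiv_two_mid_bounds (le_of_lt h)
    have hmidlt : PySem.Int.floordiv (lo + hi) 2 < hi := by
      rw [PySem.Int.floordiv_lt_iff_lt_mul (by norm_num : (0:Int) < 2)]; omega
    set m := PySem.Int.floordiv (lo + hi) 2 with hm
    have hklen : m.toNat < vals.length := by omega
    have hget : PySem.List.pyGetD vals m 0 = vals[m.toNat]'hklen := by
      have hk : m = ((m.toNat : Nat) : Int) := by omega
      conv_lhs => rw [hk]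
      rw [PySem.List.pyGetD_natCast, List.getD_eq_getElem?_getD,
        List.getElem?_eq_getElem hklen, Option.getD_some]
    simp only [dif_pos h, if_pos hlt]
    rw [ih (by omega) hhi]
    constructor
    · rintro ⟨i, h1, h2, h3⟩; exact ⟨i, by omega, h2, h3⟩
    · rintro ⟨i, h1, h2, h3⟩
      have hilen : i < vals.length := (List.getElem?_eq_some_iff.1 h3).1
      have hvi : vals[i]'hilen = t := (List.getElem?_eq_some_iff.1 h3).2
      refine ⟨i, ?_, h2, h3⟩
      by_contra hcon
      push_neg at hcon
      have hle : vals[i]'hilen ≤ vals[m.toNat]'hklen := hmono i m.toNat (by omega) hklen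
      rw [hget] at hlt
      omega
  | case2 lo hi h hlt hgt ih =>
    intro hlo hhi
    rw [pvFound]
    have hmid := PySem.Int.floordiv_two_mid_bounds (le_of_lt h)
    have hmidlt : PySem.Int.floordiv (lo + hi) 2 < hi := by
      rw [PySem.Int.floordiv_lt_iff_lt_mul (by norm_num : (0:Int) < 2)]; omega
    set m := PySem.Int.floordiv (lo + hi) 2 with hm
    have hklen : m.toNat < vals.length := by omega
    have hget : PySem.List.pyGetD vals m 0 = vals[m.toNat]'hklen := by
      have hk : m = ((m.toNat : Nat) : Int) := by omega
      conv_lhs => rw [hk]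
      rw [PySem.List.pyGetD_natCast, List.getD_eq_getElem?_getD,
        List.getElem?_eq_getElem hklen, Option.getD_some]
    simp only [dif_pos h, if_neg hlt, if_pos hgt]
    rw [ih hlo (by omega)]
    constructor
    · rintro ⟨i, h1, h2, h3⟩; exact ⟨i, h1, by omega, h3⟩
    · rintro ⟨i, h1, h2, h3⟩
      have hilen : i < vals.length := (List.getElem?_eq_some_iff.1 h3).1
      have hvi : vals[i]'hilen = t := (List.getElem?_eq_some_iff.1 h3).2
      refine ⟨i, h1, ?_, h3⟩
      by_contra hcon
      push_neg at hcon
      have hle : vals[m.toNat]'hklen ≤ vals[i]'hilen := hmono m.toNat i (by omega) hilen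
      rw [hget] at hgt
      omega
  | case3 lo hi h hlt hgt =>
    intro hlo hhi
    rw [pvFound]
    have hmid := PySem.Int.floordiv_two_mid_bounds (le_of_lt h)
    have hmidlt : PySem.Int.floordiv (lo + hi) 2 < hi := by
      rw [PySem.Int.floordiv_lt_iff_lt_mul (by norm_num : (0:Int) < 2)]; omega
    set m := PySem.Int.floordiv (lo + hi) 2 with hm
    have hklen : m.toNat < vals.length := by omega
    have hget : PySem.List.pyGetD vals m 0 = vals[m.toNat]'hklen := by
      have hk : m = ((m.toNat : Nat) : Int) := by omega
      conv_lhs => rw [hk]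
      rw [PySem.List.pyGetD_natCast, List.getD_eq_getElem?_getD,
        List.getElem?_eq_getElem hklen, Option.getD_some]
    simp only [dif_pos h, if_neg hlt, if_neg hgt, true_iff]
    rw [hget] at hlt hgt
    have heq : vals[m.toNat]'hklen = t := by omega
    exact ⟨m.toNat, by omega, by omega, by rw [List.getElem?_eq_getElem hklen, heq]⟩
  | case4 lo hi h =>
    intro _ _
    rw [pvFound]
    simp only [dif_neg h, Bool.false_eq_true, false_iff]
    rintro ⟨i, h1, h2, _⟩; omega

-- full-range binary search on the sorted list is membership
theorem pvFound_mem (xs : List Int) (t : Int) :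
    pvFound (PySem.List.sorted xs (fun x => x) false) t 0
        (PySem.List.len (PySem.List.sorted xs (fun x => x) false)) = true ↔ t ∈ xs := by
  set s := PySem.List.sorted xs (fun x => x) false with hsdef
  have hs : s.Pairwise (· ≤ ·) := PySem.List.sorted_pairwise xs (fun x => x)
  rw [show PySem.List.len s = (s.length : Int) from PySem.List.len_eq s]
  rw [pvFound_iff s t hs 0 (s.length : Int) le_rfl le_rfl]
  have hms : t ∈ s ↔ t ∈ xs := by
    rw [hsdef]; exact PySem.List.mem_sorted xs (fun x => x) false t
  constructor
  · rintro ⟨i, _, _, h3⟩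
    exact hms.1 (List.mem_iff_getElem?.2 ⟨i, h3⟩)
  · intro hmem
    obtain ⟨i, h3⟩ := List.mem_iff_getElem?.1 (hms.2 hmem)
    have : i < s.length := (List.getElem?_eq_some_iff.1 h3).1
    exact ⟨i, by omega, by omega, h3⟩

-- ===== VERDICT (by name: the statement is the Claim_ definition above) =====
theorem check_tranc_spec : Claim_equal_check_tranc := by
  intro a b _ _
  unfold Spec_check_tranc check_tranc check_tranc_alt
  set t0 := (PySem.List.pyGetD a 0 (0, 0)).1 with ht0
  set t1 := (PySem.List.pyGetD a (PySem.List.len a - 1) (0, 0)).2 with ht1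
  have hinner : ∀ (f : List (Int × Int)) (u : Int),
      (PySem.List.pyRange 0 (PySem.List.len f) 1).foldl
        (fun u i =>
          if t0 == (PySem.List.pyGetD f i (0, 0)).1
             || t1 == (PySem.List.pyGetD f i (0, 0)).1
             || t0 == (PySem.List.pyGetD f i (0, 0)).2
             || t1 == (PySem.List.pyGetD f i (0, 0)).2
          then u + 1 else u) u
      = u + (f.countP (pvHit t0 t1) : Int) := by
    intro f u
    have h := PySem.List.foldl_pyRange_zero_pyGetD f ((0, 0) : Int × Int)
      (fun u fi => if pvHit t0 t1 fi then u + 1 else u) u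
    simp only [pvHit] at h
    have h2 := pvInner_count t0 t1 f u
    simp only [pvHit] at h2
    exact h.trans h2
  simp only [hinner]
  rw [PySem.List.foldl_add b (fun f => ((f.countP (pvHit t0 t1)) : Int)) 0]
  set vals := b.flatMap (fun f => f.flatMap (fun p => [p.1, p.2])) with hvals
  have hf0 := pvFound_mem vals t0
  have hf1 := pvFound_mem vals t1
  simp only [PySem.List.len_eq, PySem.List.length_sorted] at hf0 hf1
  by_cases hpos : 0 < (b.map (fun f => ((f.countP (pvHit t0 t1)) : Int))).sum
  · obtain ⟨x, hx, hor⟩ := (pvCount_pos t0 t1 b).1 hpos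
    have hne : (PySem.List.sorted vals (fun x => x) false).isEmpty = false := by
      rw [List.isEmpty_eq_false_iff_exists_mem]
      exact ⟨x, (PySem.List.mem_sorted vals (fun x => x) false x).2 hx⟩
    rcases hor with rfl | rfl
    · have hfd : pvFound (PySem.List.sorted vals (fun x => x) false) t0 0
          ((vals.length : Nat) : Int) = true := hf0.2 hx
      simp [hpos, hne, hfd]
    · have hfd : pvFound (PySem.List.sorted vals (fun x => x) false) t1 0
          ((vals.length : Nat) : Int) = true := hf1.2 hx
      simp [hpos, hne, hfd]
  · have hno : ¬ ∃ x ∈ vals, x = t0 ∨ x = t1 := fun h => hpos ((pvCount_pos t0 t1 b).2 h)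
    push_neg at hno
    have h0 : t0 ∉ vals := fun h => (hno t0 h).1 rfl
    have h1 : t1 ∉ vals := fun h => (hno t1 h).2 rfl
    have hn0 : pvFound (PySem.List.sorted vals (fun x => x) false) t0 0
        ((vals.length : Nat) : Int) = false := by
      rw [Bool.eq_false_iff]; intro hc; exact h0 (hf0.1 hc)
    have hn1 : pvFound (PySem.List.sorted vals (fun x => x) false) t1 0
        ((vals.length : Nat) : Int) = false := by
      rw [Bool.eq_false_iff]; intro hc; exact h1 (hf1.1 hc)
    by_cases he : (PySem.List.sorted vals (fun x => x) false).isEmpty = true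
    · simp [he, hpos]
    · simp [he, hpos, hn0, hn1]
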